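-- pv_equiv track=rewrite | github.com/Vitosh/AlgoTests | rmq.py | create_a_binary_tree
-- ===== SOURCE A (Python) =====
-- def create_a_binary_tree(list_first_line):
--     known_leaves = len(list_first_line)
--     total_leaf_size = 2**((len(list_first_line)-1).bit_length())
--
--     tree = []
--     tree.extend([0]*(total_leaf_size-1))
--     tree.extend(list_first_line)
--     tree.extend([0]*(total_leaf_size-known_leaves))
--
--     start_at = total_leaf_size-2
--
--     while start_at>= 0:
--         tree[start_at] = min(tree[2*start_at+1], tree[2*start_at+2])
--         start_at -= 1
--
--     return tree
-- ===== SOURCE B (Python) =====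
-- def create_a_binary_tree(list_first_line):
--     known_leaves = len(list_first_line)
--     total_leaf_size = 2 ** ((known_leaves - 1).bit_length())
--     tree = [0] * (total_leaf_size - 1) + list_first_line + [0] * (total_leaf_size - known_leaves)
--
--     def build(i):
--         # leaves (and padding) are the base case
--         if i >= total_leaf_size - 1:
--             return tree[i]
--         v = min(build(2 * i + 1), build(2 * i + 2))
--         tree[i] = v
--         return v
--
--     if total_leaf_size >= 2:
--         build(0)
--     return tree
-- ===== Notes on version B (the rewrite author's own statement) =====
-- stated objective: alternative
-- what changed: The descending index while-loop that fills internal nodes bottom-up is replaced by a top-down recursive build(i) that builds both children and stores their minimum, reaching each internal node by tree recursion instead of an index sweep.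
import Mathlib
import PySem

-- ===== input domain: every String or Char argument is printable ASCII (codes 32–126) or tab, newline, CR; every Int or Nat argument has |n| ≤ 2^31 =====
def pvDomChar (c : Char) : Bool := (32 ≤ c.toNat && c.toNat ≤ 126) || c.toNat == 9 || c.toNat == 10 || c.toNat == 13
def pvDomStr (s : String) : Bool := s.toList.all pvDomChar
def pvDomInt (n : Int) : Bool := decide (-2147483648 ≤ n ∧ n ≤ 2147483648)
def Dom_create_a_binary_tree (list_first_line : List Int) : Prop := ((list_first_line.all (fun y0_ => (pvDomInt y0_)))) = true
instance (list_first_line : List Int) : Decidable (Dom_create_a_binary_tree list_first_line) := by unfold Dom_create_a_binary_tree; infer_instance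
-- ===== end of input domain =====

-- B replaces A's descending index while-loop by a top-down recursive build of the two
-- subtrees of each internal node (alternative decomposition, same cost, return value only:
-- the Python versions build the list in place but callers only see the returned list).

-- ===== PORT A =====
-- the while-loop: processes start_at = k, k-1, ..., 0 (indices are Nat; the loop is entered
-- only when start_at >= 0, which the caller checks as 2 ≤ size)
def downLoopA : List Int → Nat → List Int
  | t, 0 => t.set 0 (min (t.getD 1 0) (t.getD 2 0))
  | t, j+1 => downLoopA (t.set (j+1) (min (t.getD (2*(j+1)+1) 0) (t.getD (2*(j+1)+2) 0))) j

def create_a_binary_tree (list_first_line : List Int) : List Int :=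
  let known_leaves := list_first_line.length
  let total_leaf_size := 2 ^ (PySem.Int.bitLength ((known_leaves : Int) - 1))
  let tree := List.replicate (total_leaf_size - 1) 0 ++ list_first_line
      ++ List.replicate (total_leaf_size - known_leaves) 0
  -- while start_at >= 0 … (all tree[...] accesses are in range, so getD is exact here)
  if 2 ≤ total_leaf_size then downLoopA tree (total_leaf_size - 2) else tree

-- ===== PORT B =====
-- build(i): returns (updated tree, value of node i)
def buildB (size : Nat) (i : Nat) (t : List Int) : List Int × Int :=
  if h : size - 1 ≤ i then (t, t.getD i 0)   -- tree[i]; in range on every reached index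
  else
    let l := buildB size (2*i+1) t
    let r := buildB size (2*i+2) l.1
    let v := min l.2 r.2
    (r.1.set i v, v)
termination_by size - i
decreasing_by all_goals omega

def create_a_binary_tree_alt (list_first_line : List Int) : List Int :=
  let known_leaves := list_first_line.length
  let total_leaf_size := 2 ^ (PySem.Int.bitLength ((known_leaves : Int) - 1))
  let tree := List.replicate (total_leaf_size - 1) 0 ++ list_first_line
      ++ List.replicate (total_leaf_size - known_leaves) 0
  if 2 ≤ total_leaf_size then (buildB total_leaf_size 0 tree).1 else tree

-- ===== PRECONDITION & SPEC =====
def Spec_create_a_binary_tree (list_first_line : List Int) (out : List Int) : Prop := out = create_a_binary_tree_alt list_first_line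
instance (list_first_line : List Int) (out : List Int) : Decidable (Spec_create_a_binary_tree list_first_line out) := by unfold Spec_create_a_binary_tree; infer_instance

-- ===== CLAIM (what is proved, stated in full; the proofs are below) =====
def Claim_equal_create_a_binary_tree : Prop := ∀ (list_first_line : List Int), Dom_create_a_binary_tree list_first_line → Spec_create_a_binary_tree list_first_line (create_a_binary_tree list_first_line)

-- ===== LEMMAS AND PROOFS =====

-- the mathematical value of node i in the segment tree over leaf array t0
def fmin (size : Nat) (t0 : List Int) (i : Nat) : Int :=
  if size - 1 ≤ i then t0.getD i 0
  else min (fmin size t0 (2*i+1)) (fmin size t0 (2*i+2))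
termination_by size - i
decreasing_by all_goals omega

-- "j lies in the subtree rooted at i"
def desc (i : Nat) : Nat → Bool
  | j => if j = i then true else if j = 0 then false else desc i ((j-1)/2)
termination_by j => j
decreasing_by omega

lemma getD_set_eq (l : List Int) (i : Nat) (a : Int) (h : i < l.length) :
    (l.set i a).getD i 0 = a := by
  simp [List.getD_eq_getElem?_getD, h]

lemma getD_set_ne (l : List Int) (i j : Nat) (a : Int) (h : i ≠ j) :
    (l.set i a).getD j 0 = l.getD j 0 := by
  simp [List.getD_eq_getElem?_getD, List.getElem?_set_ne h]

lemma desc_self (i : Nat) : desc i i = true := by rw [desc]; simp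

lemma desc_step (i j : Nat) (hji : j ≠ i) (hj0 : j ≠ 0) :
    desc i j = desc i ((j-1)/2) := by
  rw [desc, if_neg hji, if_neg hj0]

lemma desc_le (i : Nat) : ∀ j, desc i j = true → i ≤ j := by
  intro j
  induction j using Nat.strong_induction_on with
  | _ j ih =>
    rw [desc]
    split
    · omega
    · split
      · simp
      · intro h
        have := ih ((j-1)/2) (by omega) h
        omega

lemma desc_children (i : Nat) : ∀ j, desc i j = (j == i || desc (2*i+1) j || desc (2*i+2) j) := by
  intro j
  induction j using Nat.strong_induction_on with
  | _ j ih =>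
    by_cases hji : j = i
    · subst hji
      have h1 : desc (2*j+1) j = false := by
        cases h : desc (2*j+1) j
        · rfl
        · have := desc_le _ _ h; omega
      have h2 : desc (2*j+2) j = false := by
        cases h : desc (2*j+2) j
        · rfl
        · have := desc_le _ _ h; omega
      simp [desc_self, h1, h2]
    · by_cases hj0 : j = 0
      · subst hj0
        have h1 : desc (2*i+1) 0 = false := by
          cases h : desc (2*i+1) 0
          · rfl
          · have := desc_le _ _ h; omega
        have h2 : desc (2*i+2) 0 = false := by
          cases h : desc (2*i+2) 0
          · rfl
          · have := desc_le _ _ h; omega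
        rw [desc, if_neg (by omega : ¬ (0 : Nat) = i), if_pos rfl]
        simp [hji, h1, h2]
      · by_cases hL : j = 2*i+1
        · subst hL
          have hlhs : desc i (2*i+1) = true := by
            rw [desc_step i (2*i+1) hji hj0]
            have hp : (2*i+1-1)/2 = i := by omega
            rw [hp, desc_self]
          rw [hlhs, desc_self]
          simp
        · by_cases hR : j = 2*i+2
          · subst hR
            have hlhs : desc i (2*i+2) = true := by
              rw [desc_step i (2*i+2) hji hj0]
              have hp : (2*i+2-1)/2 = i := by omega
              rw [hp, desc_self]
            rw [hlhs, desc_self]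
            simp
          · have hp : (j-1)/2 < j := by omega
            have hpi : ((j-1)/2 : Nat) ≠ i := by
              intro h; omega
            rw [desc_step i j hji hj0, desc_step (2*i+1) j hL hj0,
              desc_step (2*i+2) j hR hj0, ih _ hp]
            have e1 : (((j-1)/2 : Nat) == i) = false := by simpa using hpi
            have e2 : ((j : Nat) == i) = false := by simpa using hji
            rw [e1, e2]

lemma desc_zero : ∀ j, desc 0 j = true := by
  intro j
  induction j using Nat.strong_induction_on with
  | _ j ih =>
    by_cases h0 : j = 0
    · rw [h0, desc_self]
    · rw [desc_step 0 j h0 h0]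
      exact ih _ (by omega)

lemma downLoopA_length (t : List Int) (k : Nat) : (downLoopA t k).length = t.length := by
  induction k generalizing t with
  | zero => simp [downLoopA]
  | succ j ih => simp [downLoopA, ih]

-- A's loop invariant: if all indices above k already hold their fmin value and indices ≤ k
-- are untouched, the loop from k down to 0 makes every index hold its fmin value.
lemma loopA_eq (size : Nat) (t0 : List Int) (hs : 2 ≤ size) (hL : t0.length = 2*size-1) :
    ∀ k (t : List Int), k ≤ size - 2 → t.length = t0.length →
    (∀ j, k < j → t.getD j 0 = fmin size t0 j) →
    (∀ j, j ≤ k → t.getD j 0 = t0.getD j 0) →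
    ∀ j, (downLoopA t k).getD j 0 = fmin size t0 j := by
  intro k
  induction k with
  | zero =>
    intro t hk hlen habove hbelow j
    rw [downLoopA]
    by_cases hj : j = 0
    · subst hj
      rw [getD_set_eq _ _ _ (by omega)]
      rw [habove 1 (by omega), habove 2 (by omega)]
      conv_rhs => rw [fmin, if_neg (by omega : ¬ (size - 1 ≤ 0))]
    · rw [getD_set_ne _ _ _ _ (fun h => hj h.symm)]
      exact habove j (by omega)
  | succ m ih =>
    intro t hk hlen habove hbelow j
    rw [downLoopA]
    set t' := t.set (m+1) (min (t.getD (2*(m+1)+1) 0) (t.getD (2*(m+1)+2) 0)) with ht'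
    apply ih t' (by omega) (by simp [ht', hlen])
    · intro j hj
      by_cases hje : j = m+1
      · subst hje
        rw [ht', getD_set_eq _ _ _ (by omega)]
        rw [habove _ (by omega), habove _ (by omega)]
        conv_rhs => rw [fmin, if_neg (by omega : ¬ (size - 1 ≤ m+1))]
      · rw [ht', getD_set_ne _ _ _ _ (fun h => hje h.symm)]
        exact habove j (by omega)
    · intro j hj
      rw [ht', getD_set_ne _ _ _ _ (by omega)]
      exact hbelow j (by omega)

-- B's build: returns the fmin value, keeps the length, changes exactly the internal
-- indices of the subtree of i (to their fmin values), and never touches leaves.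
lemma buildB_main (size : Nat) (t0 : List Int) (hL : t0.length = 2*size-1) :
    ∀ n i, size - i ≤ n → ∀ t, t.length = t0.length →
    (∀ j, size - 1 ≤ j → t.getD j 0 = t0.getD j 0) →
    (buildB size i t).2 = fmin size t0 i ∧
    (buildB size i t).1.length = t.length ∧
    (∀ j, (buildB size i t).1.getD j 0 =
      if desc i j = true ∧ j < size - 1 then fmin size t0 j else t.getD j 0) := by
  intro n
  induction n with
  | zero =>
    intro i hi t hlen hleaf
    have hbase : size - 1 ≤ i := by omega
    rw [buildB, dif_pos hbase, fmin, if_pos hbase]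
    refine ⟨hleaf i hbase, rfl, ?_⟩
    intro j
    rw [if_neg]
    rintro ⟨hd, hj⟩
    have := desc_le _ _ hd
    omega
  | succ n ih =>
    intro i hi t hlen hleaf
    by_cases hbase : size - 1 ≤ i
    · rw [buildB, dif_pos hbase, fmin, if_pos hbase]
      refine ⟨hleaf i hbase, rfl, ?_⟩
      intro j
      rw [if_neg]
      rintro ⟨hd, hj⟩
      have := desc_le _ _ hd
      omega
    · rw [buildB, dif_neg hbase]
      obtain ⟨ihv1, ihl1, iha1⟩ := ih (2*i+1) (by omega) t hlen hleaf
      have hleaf1 : ∀ j, size - 1 ≤ j →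
          (buildB size (2*i+1) t).1.getD j 0 = t0.getD j 0 := by
        intro j hj
        rw [iha1 j, if_neg (by rintro ⟨_, h⟩; omega)]
        exact hleaf j hj
      obtain ⟨ihv2, ihl2, iha2⟩ :=
        ih (2*i+2) (by omega) (buildB size (2*i+1) t).1 (by rw [ihl1, hlen]) hleaf1
      have hval : min (buildB size (2*i+1) t).2
          (buildB size (2*i+2) (buildB size (2*i+1) t).1).2 = fmin size t0 i := by
        rw [ihv1, ihv2]
        conv_rhs => rw [fmin, if_neg hbase]
      refine ⟨hval, by simp [ihl2, ihl1], ?_⟩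
      intro j
      by_cases hj : j = i
      · subst hj
        rw [getD_set_eq _ _ _ (by rw [ihl2, ihl1, hlen, hL]; omega)]
        rw [hval, if_pos ⟨desc_self j, by omega⟩]
      · rw [getD_set_ne _ _ _ _ (fun h => hj h.symm)]
        rw [iha2 j]
        have hch : desc i j = (j == i || desc (2*i+1) j || desc (2*i+2) j) :=
          desc_children i j
        by_cases h2 : desc (2*i+2) j = true ∧ j < size - 1
        · rw [if_pos h2, if_pos]
          rw [hch]
          exact ⟨by simp [h2.1], h2.2⟩
        · rw [if_neg h2, iha1 j]
          by_cases h1 : desc (2*i+1) j = true ∧ j < size - 1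
          · rw [if_pos h1, if_pos]
            rw [hch]
            exact ⟨by simp [h1.1], h1.2⟩
          · rw [if_neg h1, if_neg]
            rintro ⟨hd, hjs⟩
            rw [hch] at hd
            simp only [Bool.or_eq_true, beq_iff_eq] at hd
            rcases hd with (hd | hd) | hd
            · exact hj hd
            · exact h1 ⟨hd, hjs⟩
            · exact h2 ⟨hd, hjs⟩

lemma eq_of_getD (a b : List Int) (hlen : a.length = b.length)
    (h : ∀ j, a.getD j 0 = b.getD j 0) : a = b := by
  apply List.ext_getElem hlen
  intro i h1 h2
  have := h i
  simpa [List.getD_eq_getElem?_getD, List.getElem?_eq_getElem, h1, h2] using this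

-- ===== VERDICT (by name: the statement is the Claim_ definition above) =====
theorem create_a_binary_tree_spec : Claim_equal_create_a_binary_tree := by
  intro l _
  show create_a_binary_tree l = create_a_binary_tree_alt l
  rw [create_a_binary_tree, create_a_binary_tree_alt]
  set n := l.length with hn
  set size := 2 ^ (PySem.Int.bitLength ((n : Int) - 1)) with hsz
  set t0 := List.replicate (size - 1) 0 ++ l ++ List.replicate (size - n) 0 with ht0
  by_cases hs : 2 ≤ size
  · rw [if_pos hs, if_pos hs]
    have hnle : n ≤ size := by
      have h1 := PySem.Int.lt_two_pow_bitLength ((n : Int) - 1)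
      rw [← hsz] at h1
      omega
    have hL : t0.length = 2 * size - 1 := by
      rw [ht0]
      simp [List.length_append, List.length_replicate]
      omega
    have hleaf : ∀ j, size - 1 ≤ j → t0.getD j 0 = t0.getD j 0 := fun _ _ => rfl
    have hfm : ∀ j, size - 1 ≤ j → t0.getD j 0 = fmin size t0 j := by
      intro j hj
      rw [fmin, if_pos hj]
    have hA := loopA_eq size t0 hs hL (size - 2) t0 (le_refl _) rfl
      (fun j hj => hfm j (by omega)) (fun _ _ => rfl)
    obtain ⟨_, hBlen, hB⟩ := buildB_main size t0 hL size 0 (by omega) t0 rfl hleaf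
    apply eq_of_getD
    · rw [downLoopA_length, hBlen]
    · intro j
      rw [hA j, hB j]
      by_cases hj : j < size - 1
      · rw [if_pos ⟨desc_zero j, hj⟩]
      · rw [if_neg (by rintro ⟨_, h⟩; exact hj h)]
        exact (hfm j (by omega)).symm
  · rw [if_neg hs, if_neg hs]
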